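-- pv_equiv track=rewrite | github.com/nicolostancato-web/pump-scanner | the-wolf-of-italy/v4/dashboard/app.py | parse_active_positions
-- ===== SOURCE A (Python) =====
-- def parse_active_positions(content: str) -> list[dict]:
--     """Parse active_positions.md — handles Italian field names from CFO agent."""
--     if not content:
--         return []
--     positions, current = [], {}
--     for line in content.split("\n"):
--         s = line.strip()
--         if s.startswith("## "):
--             if current.get("name"):
--                 positions.append(current)
--             current = {"name": s.lstrip("# ").strip()}
--         elif s.startswith("#") or s.startswith("|") or s.startswith("---") or s.startswith("Steps") or s.startswith("Alert") or s.startswith("Posizioni"):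
--             continue
--         elif ":" in s and current.get("name"):
--             k, _, v = s.partition(":")
--             k, v = k.strip(), v.strip()
--             current[k] = v
--             lk = k.lower()
--             # Normalize Italian field names
--             if "capitale" in lk or ("investit" in lk):
--                 current["invested"] = v.split("(")[0].strip()
--             elif "valore" in lk and "attual" in lk:
--                 current["current_value"] = v.split("(")[0].strip()
--             elif lk in ("stato", "status"):
--                 current["status"] = v
--             elif "drop" in lk:
--                 current["drop_atteso"] = v
--     if current.get("name"):
--         positions.append(current)
--     return [p for p in positions if p.get("name") and "Riepilogo" not in p.get("name", "")]
-- ===== SOURCE B (Python) =====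
-- def _norm(k, v):
--     """Return the normalized Italian field to add for key k / value v, or None."""
--     lk = k.lower()
--     if "capitale" in lk or "investit" in lk:
--         return ("invested", v.split("(")[0].strip())
--     if "valore" in lk and "attual" in lk:
--         return ("current_value", v.split("(")[0].strip())
--     if lk in ("stato", "status"):
--         return ("status", v)
--     if "drop" in lk:
--         return ("drop_atteso", v)
--     return None
--
--
-- def _apply(d, s):
--     """Fold one (already stripped) body line into the position dict."""
--     if s.startswith(("#", "|", "---", "Steps", "Alert", "Posizioni")):
--         return d
--     if ":" in s and d.get("name"):
--         k, _, v = s.partition(":")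
--         k, v = k.strip(), v.strip()
--         d[k] = v
--         n = _norm(k, v)
--         if n:
--             d[n[0]] = n[1]
--     return d
--
--
-- def _group(lines):
--     """Group stripped lines into (header-name, body-lines) sections; lines
--     before the first '## ' header are discarded."""
--     sections = []
--     i, n = 0, len(lines)
--     while i < n:
--         s = lines[i].strip()
--         i += 1
--         if s.startswith("## "):
--             body = []
--             while i < n and not lines[i].strip().startswith("## "):
--                 body.append(lines[i].strip())
--                 i += 1
--             sections.append((s.lstrip("# ").strip(), body))
--     return sections
--
--
-- def parse_active_positions(content: str) -> list[dict]:
--     if not content: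
--         return []
--     positions = []
--     for header, body in _group(content.split("\n")):
--         d = {"name": header}
--         for s in body:
--             d = _apply(d, s)
--         positions.append(d)
--     return [p for p in positions if p.get("name") and "Riepilogo" not in p.get("name", "")]
-- ===== Notes on version B (the rewrite author's own statement) =====
-- stated objective: alternative
-- what changed: A interleaves section detection and field parsing in one stateful loop over all lines with a carried 'current' dict; B first groups the lines into (header, body) sections in a separate pass and then builds each position dict independently by folding the body lines, filtering at the end.
import Mathlib
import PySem

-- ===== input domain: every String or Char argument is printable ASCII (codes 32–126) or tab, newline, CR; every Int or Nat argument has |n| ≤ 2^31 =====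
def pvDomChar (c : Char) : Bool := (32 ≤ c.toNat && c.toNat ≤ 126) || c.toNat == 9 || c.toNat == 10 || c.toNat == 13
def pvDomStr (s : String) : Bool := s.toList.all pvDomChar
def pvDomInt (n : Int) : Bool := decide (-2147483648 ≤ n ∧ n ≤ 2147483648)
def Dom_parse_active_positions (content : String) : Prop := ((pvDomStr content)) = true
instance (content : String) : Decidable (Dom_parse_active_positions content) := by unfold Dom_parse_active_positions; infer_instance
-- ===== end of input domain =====

-- B re-decomposes A's single stateful loop as a grouping pass into (header, body) sections
-- followed by an independent fold per section (objective: alternative decomposition, same cost).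

-- shared primitive stand-ins (hand ports of Python built-ins PySem lacks):
-- s.lstrip("# "): drop leading chars belonging to {'#', ' '} (exact)
def pvLstripHash (s : String) : String :=
  String.ofList (s.toList.dropWhile (fun c => c == '#' || c == ' '))

-- s.partition(":") as its first and third components (exact: splits at the FIRST ':';
-- when ':' is absent it yields (s, ""), exactly as Python's partition)
def pvPartitionColon (s : String) : String × String :=
  (String.ofList (s.toList.takeWhile (fun c => !(c == ':'))),
   String.ofList ((s.toList.dropWhile (fun c => !(c == ':'))).drop 1))

-- v.split("(")[0]: split with a nonempty separator is never empty, so [0] is its head (exact)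
-- s.split(sep) for a nonempty literal sep: Str.split? is none only for sep = "", so getD never fires
def pvSplit (s sep : String) : List String :=
  (PySem.Str.split? s sep).getD []

-- v.split("(")[0]: split with a nonempty separator is never empty, so [0] is its head (exact)
def pvHeadSplitParen (v : String) : String :=
  (pvSplit v "(").headD ""

-- truthiness of p.get("name") and the final filter's predicate (used by both return statements)
def pvKeep (d : PySem.Dict String String) : Bool :=
  (d.getD "name" "" != "") && !(PySem.Str.isIn "Riepilogo" (d.getD "name" ""))

-- ===== PORT A =====
def pvStepA (st : List (PySem.Dict String String) × PySem.Dict String String) (line : String) :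
    List (PySem.Dict String String) × PySem.Dict String String :=
  let positions := st.1
  let current := st.2
  let s := PySem.Str.strip line
  if PySem.Str.startswith s "## " then
    let positions := if current.getD "name" "" != "" then positions ++ [current] else positions
    (positions, (PySem.Dict.empty).insert "name" (PySem.Str.strip (pvLstripHash s)))
  else if PySem.Str.startswith s "#" || PySem.Str.startswith s "|" ||
          PySem.Str.startswith s "---" || PySem.Str.startswith s "Steps" ||
          PySem.Str.startswith s "Alert" || PySem.Str.startswith s "Posizioni" then
    (positions, current)
  else if PySem.Str.isIn ":" s && (current.getD "name" "" != "") then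
    let kv := pvPartitionColon s
    let k := PySem.Str.strip kv.1
    let v := PySem.Str.strip kv.2
    let current := current.insert k v
    let lk := PySem.Str.lower k
    let current :=
      if PySem.Str.isIn "capitale" lk || PySem.Str.isIn "investit" lk then
        current.insert "invested" (PySem.Str.strip (pvHeadSplitParen v))
      else if PySem.Str.isIn "valore" lk && PySem.Str.isIn "attual" lk then
        current.insert "current_value" (PySem.Str.strip (pvHeadSplitParen v))
      else if lk == "stato" || lk == "status" then
        current.insert "status" v
      else if PySem.Str.isIn "drop" lk then
        current.insert "drop_atteso" v
      else current
    (positions, current)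
  else (positions, current)

def parse_active_positions (content : String) : List (List (String × String)) :=
  if content == "" then []
  else
    let st := (pvSplit content "\n").foldl pvStepA ([], PySem.Dict.empty)
    let positions := if st.2.getD "name" "" != "" then st.1 ++ [st.2] else st.1
    (positions.filter pvKeep).map PySem.Dict.items

-- ===== PORT B =====
def pvNorm (k v : String) : Option (String × String) :=
  let lk := PySem.Str.lower k
  if PySem.Str.isIn "capitale" lk || PySem.Str.isIn "investit" lk then
    some ("invested", PySem.Str.strip (pvHeadSplitParen v))
  else if PySem.Str.isIn "valore" lk && PySem.Str.isIn "attual" lk then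
    some ("current_value", PySem.Str.strip (pvHeadSplitParen v))
  else if lk == "stato" || lk == "status" then
    some ("status", v)
  else if PySem.Str.isIn "drop" lk then
    some ("drop_atteso", v)
  else none

def pvApply (d : PySem.Dict String String) (s : String) : PySem.Dict String String :=
  if PySem.Str.startswith s "#" || PySem.Str.startswith s "|" ||
     PySem.Str.startswith s "---" || PySem.Str.startswith s "Steps" ||
     PySem.Str.startswith s "Alert" || PySem.Str.startswith s "Posizioni" then d
  else if PySem.Str.isIn ":" s && (d.getD "name" "" != "") then
    let kv := pvPartitionColon s
    let k := PySem.Str.strip kv.1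
    let v := PySem.Str.strip kv.2
    let d := d.insert k v
    match pvNorm k v with
    | some nk => d.insert nk.1 nk.2
    | none => d
  else d

def pvNotHeader (l : String) : Bool := !(PySem.Str.startswith (PySem.Str.strip l) "## ")

def pvGroup : List String → List (String × List String)
  | [] => []
  | l :: rest =>
    let s := PySem.Str.strip l
    if PySem.Str.startswith s "## " then
      (PySem.Str.strip (pvLstripHash s), (rest.takeWhile pvNotHeader).map PySem.Str.strip)
        :: pvGroup (rest.dropWhile pvNotHeader)
    else pvGroup rest
termination_by l => l.length
decreasing_by
  · exact Nat.lt_succ_of_le (List.length_dropWhile_le _ _)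
  · exact Nat.lt_succ_self _

def pvBuild (sec : String × List String) : PySem.Dict String String :=
  sec.2.foldl pvApply ((PySem.Dict.empty).insert "name" sec.1)

def parse_active_positions_alt (content : String) : List (List (String × String)) :=
  if content == "" then []
  else
    ((((pvSplit content "\n") |> pvGroup).map pvBuild).filter pvKeep).map
      PySem.Dict.items

-- ===== PRECONDITION & SPEC =====
def Spec_parse_active_positions (content : String) (out : List (List (String × String))) : Prop := out = parse_active_positions_alt content
instance (content : String) (out : List (List (String × String))) : Decidable (Spec_parse_active_positions content out) := by unfold Spec_parse_active_positions; infer_instance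

-- ===== CLAIM (what is proved, stated in full; the proofs are below) =====
def Claim_equal_parse_active_positions : Prop := ∀ (content : String), Dom_parse_active_positions content → Spec_parse_active_positions content (parse_active_positions content)


-- ===== LEMMAS AND PROOFS =====

-- A's inline normalization chain computes exactly what B's pvNorm helper dictates
theorem field_eq (cur : PySem.Dict String String) (k v : String) :
    (if PySem.Str.isIn "capitale" (PySem.Str.lower k) || PySem.Str.isIn "investit" (PySem.Str.lower k) then
        (cur.insert k v).insert "invested" (PySem.Str.strip (pvHeadSplitParen v))
      else if PySem.Str.isIn "valore" (PySem.Str.lower k) && PySem.Str.isIn "attual" (PySem.Str.lower k) then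
        (cur.insert k v).insert "current_value" (PySem.Str.strip (pvHeadSplitParen v))
      else if PySem.Str.lower k == "stato" || PySem.Str.lower k == "status" then
        (cur.insert k v).insert "status" v
      else if PySem.Str.isIn "drop" (PySem.Str.lower k) then
        (cur.insert k v).insert "drop_atteso" v
      else cur.insert k v)
    = (match pvNorm k v with
       | some nk => (cur.insert k v).insert nk.1 nk.2
       | none => cur.insert k v) := by
  simp only [pvNorm]
  split_ifs <;> simp_all

-- on a non-header line, A's step leaves positions alone and acts on current exactly as B's pvApply
set_option maxHeartbeats 1000000 in
theorem pvStepA_nonheader (ps : List (PySem.Dict String String))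
    (cur : PySem.Dict String String) (l : String) (h : pvNotHeader l = true) :
    pvStepA (ps, cur) l = (ps, pvApply cur (PySem.Str.strip l)) := by
  have h' : PySem.Str.startswith (PySem.Str.strip l) "## " = false := by
    simpa [pvNotHeader] using h
  simp only [pvStepA, pvApply, h', Bool.false_eq_true, if_false]
  rw [field_eq]
  split_ifs <;> rfl

theorem pvApply_empty (s : String) : pvApply PySem.Dict.empty s = PySem.Dict.empty := by
  simp only [pvApply]
  split_ifs with h1 h2
  · rfl
  · exfalso
    simp [PySem.Dict.getD_empty] at h2
  · rfl

theorem pvFoldl_apply_empty (l : List String) :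
    l.foldl pvApply PySem.Dict.empty = PySem.Dict.empty := by
  induction l with
  | nil => rfl
  | cons x xs ih => simp [List.foldl_cons, pvApply_empty, ih]

theorem pvKeep_empty : pvKeep PySem.Dict.empty = false := by decide

theorem pvKeep_false_of_not_truthy (d : PySem.Dict String String)
    (h : (d.getD "name" "" != "") = false) : pvKeep d = false := by
  simp [pvKeep, h]

-- the heart: A's fold, finalized and filtered, decomposes along B's sections
theorem pvMain (rest : List String) : ∀ (ps : List (PySem.Dict String String))
    (cur : PySem.Dict String String),
    ((if (rest.foldl pvStepA (ps, cur)).2.getD "name" "" != ""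
        then (rest.foldl pvStepA (ps, cur)).1 ++ [(rest.foldl pvStepA (ps, cur)).2]
        else (rest.foldl pvStepA (ps, cur)).1).filter pvKeep)
    = ps.filter pvKeep
      ++ (if pvKeep (((rest.takeWhile pvNotHeader).map PySem.Str.strip).foldl pvApply cur)
            then [((rest.takeWhile pvNotHeader).map PySem.Str.strip).foldl pvApply cur] else [])
      ++ ((pvGroup (rest.dropWhile pvNotHeader)).map pvBuild).filter pvKeep := by
  induction rest with
  | nil =>
    intro ps cur
    simp only [List.foldl_nil, List.takeWhile_nil, List.dropWhile_nil, List.map_nil]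
    by_cases h : (cur.getD "name" "" != "") = true
    · simp only [h, if_true, List.filter_append, pvGroup, List.map_nil, List.filter_nil,
        List.append_nil]
      by_cases hk : pvKeep cur = true
      · simp [hk]
      · simp [hk]
    · have hf := pvKeep_false_of_not_truthy cur (by simpa using h)
      simp [h, hf, pvGroup]
  | cons l rest ih =>
    intro ps cur
    by_cases hl : pvNotHeader l = true
    · -- non-header line: it folds into cur on both sides
      simp only [List.foldl_cons, pvStepA_nonheader ps cur l hl,
        List.takeWhile_cons, List.dropWhile_cons, hl, if_true, List.map_cons,
        List.foldl_cons]
      exact ih ps (pvApply cur (PySem.Str.strip l))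
    · -- header line: cur is closed out (if truthy) and a fresh section starts
      have hh : PySem.Str.startswith (PySem.Str.strip l) "## " = true := by
        simpa [pvNotHeader] using hl
      have hstep : pvStepA (ps, cur) l =
          ((if cur.getD "name" "" != "" then ps ++ [cur] else ps),
           (PySem.Dict.empty).insert "name"
             (PySem.Str.strip (pvLstripHash (PySem.Str.strip l)))) := by
        simp only [pvStepA, hh, if_true]
      simp only [List.foldl_cons, hstep, List.takeWhile_cons, List.dropWhile_cons, hl,
        Bool.false_eq_true, if_false, List.map_nil, List.foldl_nil]
      rw [ih ((if cur.getD "name" "" != "" then ps ++ [cur] else ps))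
            ((PySem.Dict.empty).insert "name"
              (PySem.Str.strip (pvLstripHash (PySem.Str.strip l))))]
      have hps : (if cur.getD "name" "" != "" then ps ++ [cur] else ps).filter pvKeep
          = ps.filter pvKeep ++ (if pvKeep cur then [cur] else []) := by
        by_cases h : (cur.getD "name" "" != "") = true
        · by_cases hk : pvKeep cur = true
          · simp [h, List.filter_append, hk]
          · simp [h, List.filter_append, hk]
        · have hf := pvKeep_false_of_not_truthy cur (by simpa using h)
          simp [h, hf]
      rw [hps]
      have hg : pvGroup (l :: rest)
          = (PySem.Str.strip (pvLstripHash (PySem.Str.strip l)),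
             (rest.takeWhile pvNotHeader).map PySem.Str.strip)
            :: pvGroup (rest.dropWhile pvNotHeader) := by
        have hh2 : PySem.Chars.startswith (PySem.Chars.strip l.toList) ['#', '#', ' '] = true := by
          simpa using hh
        rw [pvGroup]
        simp [hh2]
      rw [hg]
      simp only [List.map_cons, List.filter_cons, pvBuild]
      by_cases hk : pvKeep (((rest.takeWhile pvNotHeader).map PySem.Str.strip).foldl pvApply
          ((PySem.Dict.empty).insert "name"
            (PySem.Str.strip (pvLstripHash (PySem.Str.strip l))))) = true
      · simp [hk, List.append_assoc]
      · simp [hk, List.append_assoc]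

-- pvGroup ignores everything before the first header
theorem pvGroup_dropWhile (l : List String) :
    pvGroup l = pvGroup (l.dropWhile pvNotHeader) := by
  induction l with
  | nil => rfl
  | cons x xs ih =>
    by_cases hx : pvNotHeader x = true
    · have hx' : PySem.Str.startswith (PySem.Str.strip x) "## " = false := by
        simpa [pvNotHeader] using hx
      have hx2 : PySem.Chars.startswith (PySem.Chars.strip x.toList) ['#', '#', ' '] = false := by
        simpa using hx'
      rw [pvGroup]
      simp [hx2, hx, ih]
    · simp [hx]



-- ===== VERDICT (by name: the statement is the Claim_ definition above) =====
theorem parse_active_positions_spec : Claim_equal_parse_active_positions := by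
  intro content _
  unfold Spec_parse_active_positions parse_active_positions parse_active_positions_alt
  by_cases hc : (content == "") = true
  · simp [hc]
  · simp only [hc, Bool.false_eq_true, if_false]
    rw [pvMain (pvSplit content "\n") [] PySem.Dict.empty]
    rw [pvFoldl_apply_empty, pvKeep_empty]
    rw [pvGroup_dropWhile (pvSplit content "\n")]
    simp
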